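-- pv_equiv track=rewrite | github.com/mohamednasserohi700-commits/SYSTEM-ERP | app.py | path_required_permission
-- ===== SOURCE A (Python) =====
-- def path_required_permission(path: str):
--     """أول بادئة مطابقة تحدد الصلاحية المطلوبة؛ None = يكفي تسجيل الدخول."""
--     p = (path or '').rstrip('/') or '/'
--     if p.startswith('/static'):
--         return None
--     if p == '/access-restricted' or p.startswith('/access-restricted/'):
--         return None
--     rules = [
--         ('/settings/users', 'users'),
--         ('/settings/connected-users', 'connected_users'),
--         ('/settings/backup', 'backup'),
--         ('/settings/branches', 'settings'),
--         ('/settings/warehouses', 'settings'),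
--         ('/settings/sale-tax', 'settings'),
--         ('/settings/app', 'settings_branding'),
--         ('/settings/database', 'settings_database'),
--         ('/returns/sale', 'returns'),
--         ('/returns/purchase', 'returns'),
--         ('/inventory/adjust', 'adjust_stock'),
--         ('/inventory/memos', 'inventory'),
--         ('/transfers', 'transfers'),
--         ('/inventory', 'inventory'),
--         ('/customers', 'customers'),
--         ('/suppliers', 'suppliers'),
--         ('/employees', 'employees'),
--         ('/expenses', 'expenses'),
--         ('/categories', 'categories'),
--         ('/products', 'products'),
--         ('/sales', 'sales'),
--         ('/purchases', 'purchases'),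
--         ('/reports', 'reports'),
--         ('/about', 'dashboard'),
--     ]
--     for prefix, perm in rules:
--         if p == prefix or p.startswith(prefix + '/'):
--             return perm
--     if p == '/' or p == '':
--         return 'dashboard'
--     return None
-- ===== SOURCE B (Python) =====
-- # Idiomatic rewrite: segment-table lookup instead of a linear scan of prefix rules.
-- _TWO = {
--     ('', 'settings', 'users'): 'users',
--     ('', 'settings', 'connected-users'): 'connected_users',
--     ('', 'settings', 'backup'): 'backup',
--     ('', 'settings', 'branches'): 'settings',
--     ('', 'settings', 'warehouses'): 'settings',
--     ('', 'settings', 'sale-tax'): 'settings',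
--     ('', 'settings', 'app'): 'settings_branding',
--     ('', 'settings', 'database'): 'settings_database',
--     ('', 'returns', 'sale'): 'returns',
--     ('', 'returns', 'purchase'): 'returns',
--     ('', 'inventory', 'adjust'): 'adjust_stock',
--     ('', 'inventory', 'memos'): 'inventory',
-- }
-- _ONE = {
--     ('', 'transfers'): 'transfers',
--     ('', 'inventory'): 'inventory',
--     ('', 'customers'): 'customers',
--     ('', 'suppliers'): 'suppliers',
--     ('', 'employees'): 'employees',
--     ('', 'expenses'): 'expenses',
--     ('', 'categories'): 'categories',
--     ('', 'products'): 'products',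
--     ('', 'sales'): 'sales',
--     ('', 'purchases'): 'purchases',
--     ('', 'reports'): 'reports',
--     ('', 'about'): 'dashboard',
-- }
--
-- def path_required_permission(path: str):
--     """أول بادئة مطابقة تحدد الصلاحية المطلوبة؛ None = يكفي تسجيل الدخول."""
--     p = (path or '').rstrip('/') or '/'
--     if p.startswith('/static'):
--         return None
--     if p == '/access-restricted' or p.startswith('/access-restricted/'):
--         return None
--     parts = p.split('/')
--     perm = _TWO.get(tuple(parts[:3])) or _ONE.get(tuple(parts[:2]))
--     if perm is not None:
--         return perm
--     return 'dashboard' if p == '/' else None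
-- ===== Notes on version B (the rewrite author's own statement) =====
-- stated objective: idiomatic
-- what changed: A scans a 24-entry prefix-rule list testing each prefix against the path; B splits the normalized path into slash-separated segments once and looks the first three (then two) segments up in two precomputed dicts keyed by segment tuples.
import Mathlib
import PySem

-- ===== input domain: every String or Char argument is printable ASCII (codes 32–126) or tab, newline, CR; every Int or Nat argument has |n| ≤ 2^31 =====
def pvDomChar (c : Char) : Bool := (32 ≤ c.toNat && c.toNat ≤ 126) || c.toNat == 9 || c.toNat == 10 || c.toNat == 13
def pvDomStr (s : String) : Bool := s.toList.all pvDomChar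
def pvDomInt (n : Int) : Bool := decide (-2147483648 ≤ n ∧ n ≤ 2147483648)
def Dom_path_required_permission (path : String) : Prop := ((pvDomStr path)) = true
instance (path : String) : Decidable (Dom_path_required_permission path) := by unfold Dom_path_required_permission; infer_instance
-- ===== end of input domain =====

-- B replaces A's linear scan of 24 prefix rules by two dict lookups keyed on the path's
-- first segments (idiomatic table lookup); equivalence proved for all strings.

-- ===== PORT A =====
def pvRules : List (List Char × String) := [
  ("/settings/users".toList, "users"),
  ("/settings/connected-users".toList, "connected_users"),
  ("/settings/backup".toList, "backup"),
  ("/settings/branches".toList, "settings"),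
  ("/settings/warehouses".toList, "settings"),
  ("/settings/sale-tax".toList, "settings"),
  ("/settings/app".toList, "settings_branding"),
  ("/settings/database".toList, "settings_database"),
  ("/returns/sale".toList, "returns"),
  ("/returns/purchase".toList, "returns"),
  ("/inventory/adjust".toList, "adjust_stock"),
  ("/inventory/memos".toList, "inventory"),
  ("/transfers".toList, "transfers"),
  ("/inventory".toList, "inventory"),
  ("/customers".toList, "customers"),
  ("/suppliers".toList, "suppliers"),
  ("/employees".toList, "employees"),
  ("/expenses".toList, "expenses"),
  ("/categories".toList, "categories"),
  ("/products".toList, "products"),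
  ("/sales".toList, "sales"),
  ("/purchases".toList, "purchases"),
  ("/reports".toList, "reports"),
  ("/about".toList, "dashboard")]

-- the 'for prefix, perm in rules: if … return perm' loop
def pvFindRule (p : List Char) : List (List Char × String) → Option String
  | [] => none
  | (pre, perm) :: rest =>
    if p = pre ∨ PySem.Chars.startswith p (pre ++ ['/']) = true then some perm
    else pvFindRule p rest

def path_required_permission (path : String) : Option String :=
  -- p = (path or '').rstrip('/') or '/'  — rstrip('/') ported by hand (PySem's rstrip is the
  -- no-argument whitespace form): dropping trailing '/' characters is exact for rstrip('/')
  let q := (path.toList.reverse.dropWhile (· == '/')).reverse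
  let p := if q = [] then "/".toList else q
  if PySem.Chars.startswith p "/static".toList then none
  else if p = "/access-restricted".toList ∨ PySem.Chars.startswith p "/access-restricted/".toList = true then none
  else
    match pvFindRule p pvRules with
    | some perm => some perm
    | none => if p = "/".toList ∨ p = [] then some "dashboard" else none

-- ===== PORT B =====
-- Python tuples of strings used as dict keys become List (List Char) keys here
def pvTwoSeg : PySem.Dict (List (List Char)) String := PySem.Dict.mk [
  ([[], "settings".toList, "users".toList], "users"),
  ([[], "settings".toList, "connected-users".toList], "connected_users"),
  ([[], "settings".toList, "backup".toList], "backup"),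
  ([[], "settings".toList, "branches".toList], "settings"),
  ([[], "settings".toList, "warehouses".toList], "settings"),
  ([[], "settings".toList, "sale-tax".toList], "settings"),
  ([[], "settings".toList, "app".toList], "settings_branding"),
  ([[], "settings".toList, "database".toList], "settings_database"),
  ([[], "returns".toList, "sale".toList], "returns"),
  ([[], "returns".toList, "purchase".toList], "returns"),
  ([[], "inventory".toList, "adjust".toList], "adjust_stock"),
  ([[], "inventory".toList, "memos".toList], "inventory")]

def pvOneSeg : PySem.Dict (List (List Char)) String := PySem.Dict.mk [
  ([[], "transfers".toList], "transfers"),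
  ([[], "inventory".toList], "inventory"),
  ([[], "customers".toList], "customers"),
  ([[], "suppliers".toList], "suppliers"),
  ([[], "employees".toList], "employees"),
  ([[], "expenses".toList], "expenses"),
  ([[], "categories".toList], "categories"),
  ([[], "products".toList], "products"),
  ([[], "sales".toList], "sales"),
  ([[], "purchases".toList], "purchases"),
  ([[], "reports".toList], "reports"),
  ([[], "about".toList], "dashboard")]

def path_required_permission_alt (path : String) : Option String :=
  -- same normalisation as A (rstrip('/') by hand, see above)
  let q := (path.toList.reverse.dropWhile (· == '/')).reverse
  let p := if q = [] then "/".toList else q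
  if PySem.Chars.startswith p "/static".toList then none
  else if p = "/access-restricted".toList ∨ PySem.Chars.startswith p "/access-restricted/".toList = true then none
  else
    let parts := PySem.Chars.splitOn p ['/']
    -- `_TWO.get(k3) or _ONE.get(k2)`: every stored permission is a nonempty (truthy) string,
    -- so Python's `or` on these Optionals is exactly Option.orElse
    match (pvTwoSeg.get? (parts.take 3)).orElse (fun _ => pvOneSeg.get? (parts.take 2)) with
    | some perm => some perm
    | none => if p = "/".toList then some "dashboard" else none

-- ===== PRECONDITION & SPEC =====
def Spec_path_required_permission (path : String) (out : Option String) : Prop := out = path_required_permission_alt path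
instance (path : String) (out : Option String) : Decidable (Spec_path_required_permission path out) := by unfold Spec_path_required_permission; infer_instance

-- ===== CLAIM (what is proved, stated in full; the proofs are below) =====
def Claim_equal_path_required_permission : Prop := ∀ (path : String), Dom_path_required_permission path → Spec_path_required_permission path (path_required_permission path)

-- ===== LEMMAS AND PROOFS =====

-- a simple structural model of p.split('/')
def pvSplitC : List Char → List (List Char)
  | [] => [[]]
  | c :: t =>
    if c = '/' then [] :: pvSplitC t
    else
      match pvSplitC t with
      | [] => [[c]]
      | h :: r => (c :: h) :: r

lemma pvSplitC_ne_nil (l : List Char) : pvSplitC l ≠ [] := by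
  cases l with
  | nil => simp [pvSplitC]
  | cons c t =>
    simp only [pvSplitC]
    split
    · simp
    · split <;> simp

lemma pvGo (fuel : Nat) : ∀ (l cur : List Char) (acc : List (List Char)), l.length < fuel →
    PySem.Chars.splitOn.go ['/'] fuel l cur acc =
      acc.reverse ++ (match pvSplitC l with
        | [] => [cur.reverse]
        | h :: r => (cur.reverse ++ h) :: r) := by
  induction fuel with
  | zero => intro l cur acc h; omega
  | succ n ih =>
    intro l cur acc h
    cases l with
    | nil => simp [PySem.Chars.splitOn.go, pvSplitC]
    | cons c t =>
      by_cases hc : c = '/'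
      · subst hc
        rw [show PySem.Chars.splitOn.go ['/'] (n+1) ('/' :: t) cur acc
              = PySem.Chars.splitOn.go ['/'] n t [] (cur.reverse :: acc) from by
            simp [PySem.Chars.splitOn.go, List.isPrefixOf]]
        rw [ih t [] (cur.reverse :: acc) (by simpa using Nat.lt_of_succ_lt_succ h)]
        rcases hsp : pvSplitC t with _ | ⟨hd, r⟩
        · exact absurd hsp (pvSplitC_ne_nil t)
        · simp [pvSplitC, hsp]
      · rw [show PySem.Chars.splitOn.go ['/'] (n+1) (c :: t) cur acc
              = PySem.Chars.splitOn.go ['/'] n t (c :: cur) acc from by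
            simp [PySem.Chars.splitOn.go, List.isPrefixOf, Ne.symm hc]]
        rw [ih t (c :: cur) acc (by simpa using Nat.lt_of_succ_lt_succ h)]
        rcases hsp : pvSplitC t with _ | ⟨hd, r⟩
        · exact absurd hsp (pvSplitC_ne_nil t)
        · simp [pvSplitC, hsp, hc]

lemma pvSplitOn_eq (l : List Char) : PySem.Chars.splitOn l ['/'] = pvSplitC l := by
  rw [show PySem.Chars.splitOn l ['/'] = PySem.Chars.splitOn.go ['/'] (l.length + 1) l [] [] from rfl]
  rw [pvGo (l.length + 1) l [] [] (by omega)]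
  rcases hsp : pvSplitC l with _ | ⟨hd, r⟩
  · exact absurd hsp (pvSplitC_ne_nil l)
  · simp

def pvJoin : List (List Char) → List Char
  | [] => []
  | [s] => s
  | s :: qs => s ++ '/' :: pvJoin qs

lemma pvJoin_cons (s : List Char) (qs : List (List Char)) (h : qs ≠ []) :
    pvJoin (s :: qs) = s ++ '/' :: pvJoin qs := by
  cases qs with
  | nil => exact absurd rfl h
  | cons a t => rfl

lemma pvMsingle (s : List Char) : ('/' : Char) ∉ s → ∀ t : List Char,
    ((pvSplitC t).take 1 = [s]) ↔ (t = s ∨ (s ++ ['/']) <+: t) := by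
  induction s with
  | nil =>
    intro _ t
    cases t with
    | nil => simp [pvSplitC]
    | cons c t' =>
      by_cases hc : c = '/'
      · subst hc; simp [pvSplitC, List.cons_prefix_cons]
      · rcases hsp : pvSplitC t' with _ | ⟨hd, r⟩
        · exact absurd hsp (pvSplitC_ne_nil t')
        · simp [pvSplitC, hsp, hc, List.cons_prefix_cons, Ne.symm hc]
  | cons s0 s' ih =>
    intro hs t
    have hs0 : s0 ≠ '/' := fun h => hs (h ▸ List.mem_cons_self ..)
    have hs' : ('/' : Char) ∉ s' := fun h => hs (List.mem_cons_of_mem _ h)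
    cases t with
    | nil => simp [pvSplitC]
    | cons c t' =>
      by_cases hc : c = '/'
      · subst hc
        simp [pvSplitC, List.cons_prefix_cons, List.cons_append, hs0, Ne.symm hs0]
      · rcases hsp : pvSplitC t' with _ | ⟨hd, r⟩
        · exact absurd hsp (pvSplitC_ne_nil t')
        · have iht : hd = s' ↔ (t' = s' ∨ (s' ++ ['/']) <+: t') := by
            simpa [hsp] using ih hs' t'
          simp only [pvSplitC, if_neg hc, hsp, List.take_succ_cons, List.take_zero,
            List.cons.injEq, and_true, List.cons_append, List.cons_prefix_cons]
          constructor
          · rintro ⟨rfl, h2⟩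
            rcases iht.mp h2 with h | h
            · exact Or.inl ⟨rfl, h⟩
            · exact Or.inr ⟨rfl, h⟩
          · rintro (⟨rfl, rfl⟩ | ⟨rfl, h⟩)
            · exact ⟨rfl, iht.mpr (Or.inl rfl)⟩
            · exact ⟨rfl, iht.mpr (Or.inr h)⟩

lemma pvMcons (qs : List (List Char)) (hq : qs ≠ [])
    (IH : ∀ t, ((pvSplitC t).take qs.length = qs) ↔
      (t = pvJoin qs ∨ (pvJoin qs ++ ['/']) <+: t))
    (s : List Char) : ('/' : Char) ∉ s → ∀ t : List Char,
    ((pvSplitC t).take (qs.length + 1) = s :: qs) ↔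
      (t = s ++ '/' :: pvJoin qs ∨ ((s ++ '/' :: pvJoin qs) ++ ['/']) <+: t) := by
  induction s with
  | nil =>
    intro _ t
    cases t with
    | nil =>
      rcases qs with _ | ⟨q, qs'⟩
      · exact absurd rfl hq
      · simp [pvSplitC]
    | cons c t' =>
      by_cases hc : c = '/'
      · subst hc
        rw [show pvSplitC ('/' :: t') = [] :: pvSplitC t' from by simp [pvSplitC]]
        simp only [List.take_succ_cons, List.cons.injEq, true_and, List.nil_append,
          List.cons_append, List.cons_prefix_cons]
        simpa using IH t'
      · rcases hsp : pvSplitC t' with _ | ⟨hd, r⟩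
        · exact absurd hsp (pvSplitC_ne_nil t')
        · simp [pvSplitC, hsp, hc, List.cons_prefix_cons, Ne.symm hc]
  | cons s0 s' ih =>
    intro hs t
    have hs0 : s0 ≠ '/' := fun h => hs (h ▸ List.mem_cons_self ..)
    have hs' : ('/' : Char) ∉ s' := fun h => hs (List.mem_cons_of_mem _ h)
    cases t with
    | nil =>
      rcases qs with _ | ⟨q, qs'⟩
      · exact absurd rfl hq
      · simp [pvSplitC]
    | cons c t' =>
      by_cases hc : c = '/'
      · subst hc
        simp [pvSplitC, List.cons_prefix_cons, List.cons_append, hs0, Ne.symm hs0]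
      · rcases hsp : pvSplitC t' with _ | ⟨hd, r⟩
        · exact absurd hsp (pvSplitC_ne_nil t')
        · have iht := ih hs' t'
          rw [hsp] at iht
          simp only [pvSplitC, if_neg hc, hsp, List.take_succ_cons, List.cons.injEq,
            List.cons_append, List.cons_prefix_cons] at iht ⊢
          constructor
          · rintro ⟨⟨rfl, hhd⟩, h3⟩
            rcases iht.mp ⟨hhd, h3⟩ with h | h
            · exact Or.inl ⟨rfl, h⟩
            · exact Or.inr ⟨rfl, h⟩
          · rintro (⟨rfl, h⟩ | ⟨rfl, h⟩)
            · obtain ⟨h1, h2⟩ := iht.mpr (Or.inl h); exact ⟨⟨rfl, h1⟩, h2⟩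
            · obtain ⟨h1, h2⟩ := iht.mpr (Or.inr h); exact ⟨⟨rfl, h1⟩, h2⟩

lemma pvM (qs : List (List Char)) (hq : qs ≠ []) (hsep : ∀ s ∈ qs, ('/' : Char) ∉ s) :
    ∀ t : List Char, ((pvSplitC t).take qs.length = qs) ↔
      (t = pvJoin qs ∨ (pvJoin qs ++ ['/']) <+: t) := by
  induction qs with
  | nil => exact absurd rfl hq
  | cons s qs' ih =>
    rcases qs' with _ | ⟨q, qs''⟩
    · simpa [pvJoin] using pvMsingle s (hsep s (List.mem_cons_self ..))
    · have hq' : (q :: qs'' : List (List Char)) ≠ [] := by simp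
      have IH := ih hq' (fun x hx => hsep x (List.mem_cons_of_mem _ hx))
      have := pvMcons (q :: qs'') hq' IH s (hsep s (List.mem_cons_self ..))
      simpa [pvJoin_cons s (q :: qs'') hq', List.length_cons] using this

-- A's per-rule test, restated on split segments (oriented for the dict side)
lemma pvCond (segs : List (List Char)) (hq : segs ≠ []) (hsep : ∀ s ∈ segs, ('/' : Char) ∉ s)
    (p : List Char) :
    (p = pvJoin segs ∨ PySem.Chars.startswith p (pvJoin segs ++ ['/']) = true) ↔
      segs = (pvSplitC p).take segs.length := by
  rw [PySem.Chars.startswith_iff]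
  have h := pvM segs hq hsep p
  exact ⟨fun hc => (h.mpr hc).symm, fun hc => h.mp hc.symm⟩

-- the common flat decision chain both programs compute
def pvChain (p : List Char) : Option String :=
  if [[], "settings".toList, "users".toList] = (pvSplitC p).take 3 then some "users"
  else if [[], "settings".toList, "connected-users".toList] = (pvSplitC p).take 3 then some "connected_users"
  else if [[], "settings".toList, "backup".toList] = (pvSplitC p).take 3 then some "backup"
  else if [[], "settings".toList, "branches".toList] = (pvSplitC p).take 3 then some "settings"
  else if [[], "settings".toList, "warehouses".toList] = (pvSplitC p).take 3 then some "settings"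
  else if [[], "settings".toList, "sale-tax".toList] = (pvSplitC p).take 3 then some "settings"
  else if [[], "settings".toList, "app".toList] = (pvSplitC p).take 3 then some "settings_branding"
  else if [[], "settings".toList, "database".toList] = (pvSplitC p).take 3 then some "settings_database"
  else if [[], "returns".toList, "sale".toList] = (pvSplitC p).take 3 then some "returns"
  else if [[], "returns".toList, "purchase".toList] = (pvSplitC p).take 3 then some "returns"
  else if [[], "inventory".toList, "adjust".toList] = (pvSplitC p).take 3 then some "adjust_stock"
  else if [[], "inventory".toList, "memos".toList] = (pvSplitC p).take 3 then some "inventory"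
  else if [[], "transfers".toList] = (pvSplitC p).take 2 then some "transfers"
  else if [[], "inventory".toList] = (pvSplitC p).take 2 then some "inventory"
  else if [[], "customers".toList] = (pvSplitC p).take 2 then some "customers"
  else if [[], "suppliers".toList] = (pvSplitC p).take 2 then some "suppliers"
  else if [[], "employees".toList] = (pvSplitC p).take 2 then some "employees"
  else if [[], "expenses".toList] = (pvSplitC p).take 2 then some "expenses"
  else if [[], "categories".toList] = (pvSplitC p).take 2 then some "categories"
  else if [[], "products".toList] = (pvSplitC p).take 2 then some "products"
  else if [[], "sales".toList] = (pvSplitC p).take 2 then some "sales"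
  else if [[], "purchases".toList] = (pvSplitC p).take 2 then some "purchases"
  else if [[], "reports".toList] = (pvSplitC p).take 2 then some "reports"
  else if [[], "about".toList] = (pvSplitC p).take 2 then some "dashboard"
  else none

lemma pvA_eq_chain (p : List Char) : pvFindRule p pvRules = pvChain p := by
  have c1 : (p = "/settings/users".toList ∨ PySem.Chars.startswith p ("/settings/users".toList ++ ['/']) = true) ↔
      [[], "settings".toList, "users".toList] = (pvSplitC p).take 3 :=
    pvCond [[], "settings".toList, "users".toList] (by simp) (by decide) p
  have c2 : (p = "/settings/connected-users".toList ∨ PySem.Chars.startswith p ("/settings/connected-users".toList ++ ['/']) = true) ↔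
      [[], "settings".toList, "connected-users".toList] = (pvSplitC p).take 3 :=
    pvCond [[], "settings".toList, "connected-users".toList] (by simp) (by decide) p
  have c3 : (p = "/settings/backup".toList ∨ PySem.Chars.startswith p ("/settings/backup".toList ++ ['/']) = true) ↔
      [[], "settings".toList, "backup".toList] = (pvSplitC p).take 3 :=
    pvCond [[], "settings".toList, "backup".toList] (by simp) (by decide) p
  have c4 : (p = "/settings/branches".toList ∨ PySem.Chars.startswith p ("/settings/branches".toList ++ ['/']) = true) ↔
      [[], "settings".toList, "branches".toList] = (pvSplitC p).take 3 :=
    pvCond [[], "settings".toList, "branches".toList] (by simp) (by decide) p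
  have c5 : (p = "/settings/warehouses".toList ∨ PySem.Chars.startswith p ("/settings/warehouses".toList ++ ['/']) = true) ↔
      [[], "settings".toList, "warehouses".toList] = (pvSplitC p).take 3 :=
    pvCond [[], "settings".toList, "warehouses".toList] (by simp) (by decide) p
  have c6 : (p = "/settings/sale-tax".toList ∨ PySem.Chars.startswith p ("/settings/sale-tax".toList ++ ['/']) = true) ↔
      [[], "settings".toList, "sale-tax".toList] = (pvSplitC p).take 3 :=
    pvCond [[], "settings".toList, "sale-tax".toList] (by simp) (by decide) p
  have c7 : (p = "/settings/app".toList ∨ PySem.Chars.startswith p ("/settings/app".toList ++ ['/']) = true) ↔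
      [[], "settings".toList, "app".toList] = (pvSplitC p).take 3 :=
    pvCond [[], "settings".toList, "app".toList] (by simp) (by decide) p
  have c8 : (p = "/settings/database".toList ∨ PySem.Chars.startswith p ("/settings/database".toList ++ ['/']) = true) ↔
      [[], "settings".toList, "database".toList] = (pvSplitC p).take 3 :=
    pvCond [[], "settings".toList, "database".toList] (by simp) (by decide) p
  have c9 : (p = "/returns/sale".toList ∨ PySem.Chars.startswith p ("/returns/sale".toList ++ ['/']) = true) ↔
      [[], "returns".toList, "sale".toList] = (pvSplitC p).take 3 :=
    pvCond [[], "returns".toList, "sale".toList] (by simp) (by decide) p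
  have c10 : (p = "/returns/purchase".toList ∨ PySem.Chars.startswith p ("/returns/purchase".toList ++ ['/']) = true) ↔
      [[], "returns".toList, "purchase".toList] = (pvSplitC p).take 3 :=
    pvCond [[], "returns".toList, "purchase".toList] (by simp) (by decide) p
  have c11 : (p = "/inventory/adjust".toList ∨ PySem.Chars.startswith p ("/inventory/adjust".toList ++ ['/']) = true) ↔
      [[], "inventory".toList, "adjust".toList] = (pvSplitC p).take 3 :=
    pvCond [[], "inventory".toList, "adjust".toList] (by simp) (by decide) p
  have c12 : (p = "/inventory/memos".toList ∨ PySem.Chars.startswith p ("/inventory/memos".toList ++ ['/']) = true) ↔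
      [[], "inventory".toList, "memos".toList] = (pvSplitC p).take 3 :=
    pvCond [[], "inventory".toList, "memos".toList] (by simp) (by decide) p
  have c13 : (p = "/transfers".toList ∨ PySem.Chars.startswith p ("/transfers".toList ++ ['/']) = true) ↔
      [[], "transfers".toList] = (pvSplitC p).take 2 :=
    pvCond [[], "transfers".toList] (by simp) (by decide) p
  have c14 : (p = "/inventory".toList ∨ PySem.Chars.startswith p ("/inventory".toList ++ ['/']) = true) ↔
      [[], "inventory".toList] = (pvSplitC p).take 2 :=
    pvCond [[], "inventory".toList] (by simp) (by decide) p
  have c15 : (p = "/customers".toList ∨ PySem.Chars.startswith p ("/customers".toList ++ ['/']) = true) ↔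
      [[], "customers".toList] = (pvSplitC p).take 2 :=
    pvCond [[], "customers".toList] (by simp) (by decide) p
  have c16 : (p = "/suppliers".toList ∨ PySem.Chars.startswith p ("/suppliers".toList ++ ['/']) = true) ↔
      [[], "suppliers".toList] = (pvSplitC p).take 2 :=
    pvCond [[], "suppliers".toList] (by simp) (by decide) p
  have c17 : (p = "/employees".toList ∨ PySem.Chars.startswith p ("/employees".toList ++ ['/']) = true) ↔
      [[], "employees".toList] = (pvSplitC p).take 2 :=
    pvCond [[], "employees".toList] (by simp) (by decide) p
  have c18 : (p = "/expenses".toList ∨ PySem.Chars.startswith p ("/expenses".toList ++ ['/']) = true) ↔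
      [[], "expenses".toList] = (pvSplitC p).take 2 :=
    pvCond [[], "expenses".toList] (by simp) (by decide) p
  have c19 : (p = "/categories".toList ∨ PySem.Chars.startswith p ("/categories".toList ++ ['/']) = true) ↔
      [[], "categories".toList] = (pvSplitC p).take 2 :=
    pvCond [[], "categories".toList] (by simp) (by decide) p
  have c20 : (p = "/products".toList ∨ PySem.Chars.startswith p ("/products".toList ++ ['/']) = true) ↔
      [[], "products".toList] = (pvSplitC p).take 2 :=
    pvCond [[], "products".toList] (by simp) (by decide) p
  have c21 : (p = "/sales".toList ∨ PySem.Chars.startswith p ("/sales".toList ++ ['/']) = true) ↔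
      [[], "sales".toList] = (pvSplitC p).take 2 :=
    pvCond [[], "sales".toList] (by simp) (by decide) p
  have c22 : (p = "/purchases".toList ∨ PySem.Chars.startswith p ("/purchases".toList ++ ['/']) = true) ↔
      [[], "purchases".toList] = (pvSplitC p).take 2 :=
    pvCond [[], "purchases".toList] (by simp) (by decide) p
  have c23 : (p = "/reports".toList ∨ PySem.Chars.startswith p ("/reports".toList ++ ['/']) = true) ↔
      [[], "reports".toList] = (pvSplitC p).take 2 :=
    pvCond [[], "reports".toList] (by simp) (by decide) p
  have c24 : (p = "/about".toList ∨ PySem.Chars.startswith p ("/about".toList ++ ['/']) = true) ↔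
      [[], "about".toList] = (pvSplitC p).take 2 :=
    pvCond [[], "about".toList] (by simp) (by decide) p
  simp only [pvRules, pvFindRule, pvChain, c1, c2, c3, c4, c5, c6, c7, c8, c9, c10, c11, c12,
    c13, c14, c15, c16, c17, c18, c19, c20, c21, c22, c23, c24]

-- distributing .orElse over an if-chain
lemma pvOrElse_ite (c : Prop) [Decidable c] (v : String) (o : Option String)
    (f : Unit → Option String) :
    (if c then some v else o).orElse f = if c then some v else o.orElse f := by
  split <;> rfl

set_option maxHeartbeats 1000000 in
lemma pvB_eq_chain (p : List Char) :
    (pvTwoSeg.get? ((pvSplitC p).take 3)).orElse (fun _ => pvOneSeg.get? ((pvSplitC p).take 2))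
      = pvChain p := by
  have hnil : ∀ x : List (List Char),
      (PySem.Dict.mk ([] : List (List (List Char) × String))).get? x = none := fun _ => rfl
  simp only [pvTwoSeg, pvOneSeg, PySem.Dict.get?_mk_cons, beq_iff_eq, hnil]
  simp only [pvOrElse_ite, Option.orElse_none]
  rfl

-- the two programs agree on every normalised (nonempty) path
lemma pvMain (p : List Char) (hp : p ≠ []) :
    (if PySem.Chars.startswith p "/static".toList then none
     else if p = "/access-restricted".toList ∨
         PySem.Chars.startswith p "/access-restricted/".toList = true then none
     else match pvFindRule p pvRules with
       | some perm => some perm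
       | none => if p = "/".toList ∨ p = [] then some "dashboard" else none)
    = (if PySem.Chars.startswith p "/static".toList then none
       else if p = "/access-restricted".toList ∨
           PySem.Chars.startswith p "/access-restricted/".toList = true then none
       else match (pvTwoSeg.get? ((PySem.Chars.splitOn p ['/']).take 3)).orElse
           (fun _ => pvOneSeg.get? ((PySem.Chars.splitOn p ['/']).take 2)) with
         | some perm => some perm
         | none => if p = "/".toList then some "dashboard" else none) := by
  rw [pvSplitOn_eq, pvA_eq_chain, pvB_eq_chain]
  simp only [or_iff_left hp]

-- ===== VERDICT (by name: the statement is the Claim_ definition above) =====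
theorem path_required_permission_spec : Claim_equal_path_required_permission := by
  intro path _
  show path_required_permission path = path_required_permission_alt path
  unfold path_required_permission path_required_permission_alt
  refine pvMain _ ?_
  split
  · decide
  · assumption
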